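-- pv_equiv track=rewrite | github.com/JenZhen/LC | lc_ladder/company/amzn/oa/Unique_Substring.py | uniqueSubstring
-- ===== SOURCE A (Python) =====
-- def uniqueSubstring(s, k):
--     # Write your code here
--     ss = set([])
--     if not s or not k:
--         return []
--     if k >= len(s):
--         return []
--     for i in range(k, len(s) + 1):
--         sub = s[i - k : i]
--         if sub not in ss:
--             ss.add(sub)
--     return [i for i in sorted(ss)]
-- ===== SOURCE B (Python) =====
-- def uniqueSubstring(s, k):
--     if not s or not k:
--         return []
--     if k >= len(s):
--         return []
--     windows = [s[i:i + k] for i in range(len(s) - k + 1)]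
--     windows.sort()
--     out = []
--     for w in windows:
--         if not out or out[-1] != w:
--             out.append(w)
--     return out
-- ===== Notes on version B (the rewrite author's own statement) =====
-- stated objective: alternative
-- what changed: Replaces the incremental hash-set dedup with collecting all length-k windows, sorting the list once, and deduplicating adjacent duplicates in a single pass (sort-based dedup instead of set+membership+final sort).
import Mathlib
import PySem

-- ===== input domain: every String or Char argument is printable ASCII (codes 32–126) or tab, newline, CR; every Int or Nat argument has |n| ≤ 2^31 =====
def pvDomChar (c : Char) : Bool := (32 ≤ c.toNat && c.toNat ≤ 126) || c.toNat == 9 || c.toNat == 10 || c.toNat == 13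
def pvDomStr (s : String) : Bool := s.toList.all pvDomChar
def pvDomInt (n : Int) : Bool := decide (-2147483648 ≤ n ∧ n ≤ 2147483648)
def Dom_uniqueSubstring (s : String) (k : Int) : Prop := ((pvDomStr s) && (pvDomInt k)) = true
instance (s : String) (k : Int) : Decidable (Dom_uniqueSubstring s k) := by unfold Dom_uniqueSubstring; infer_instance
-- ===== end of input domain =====

-- B replaces A's hash-set dedup with sort-once-then-adjacent-dedup; alternative decomposition, same results.


-- ===== PORT A =====
-- 'if sub not in ss: ss.add(sub)' is exactly PySem.Set.add
def uniqueSubstring (s : String) (k : Int) : List String :=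
  if s = "" ∨ k = 0 then []
  else if k ≥ PySem.Str.len s then []
  else
    let ss := (PySem.List.pyRange k (PySem.Str.len s + 1)).foldl
      (fun ss i => PySem.Set.add ss (PySem.Str.slice s (some (i - k)) (some i)))
      PySem.Set.empty
    PySem.List.sorted ss (fun x => x)

-- ===== PORT B =====
-- 'windows.sort()' (Python's stable merge sort, no key) is ported as the library merge sort List.mergeSort
def uniqueSubstring_alt (s : String) (k : Int) : List String :=
  if s = "" ∨ k = 0 then []
  else if k ≥ PySem.Str.len s then []
  else
    let windows := (PySem.List.pyRange 0 (PySem.Str.len s - k + 1)).map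
      (fun i => PySem.Str.slice s (some i) (some (i + k)))
    let sortedW := windows.mergeSort (fun a b => decide (a ≤ b))
    sortedW.foldl
      (fun out w => if out = [] ∨ PySem.List.pyGet? out (-1) ≠ some w then out ++ [w] else out)
      []

-- ===== PRECONDITION & SPEC =====
def Spec_uniqueSubstring (s : String) (k : Int) (out : List String) : Prop := out = uniqueSubstring_alt s k
instance (s : String) (k : Int) (out : List String) : Decidable (Spec_uniqueSubstring s k out) := by unfold Spec_uniqueSubstring; infer_instance

-- ===== CLAIM (what is proved, stated in full; the proofs are below) =====
def Claim_equal_uniqueSubstring : Prop := ∀ (s : String) (k : Int), Dom_uniqueSubstring s k → Spec_uniqueSubstring s k (uniqueSubstring s k)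

-- ===== LEMMAS AND PROOFS =====

-- pyRange as a shifted List.range (step 1, any Int bounds)
theorem pv_pyRange_eq_range (a b : Int) :
    PySem.List.pyRange a b = (List.range (b - a).toNat).map (fun j => a + Int.ofNat j) := by
  generalize hn : (b - a).toNat = n
  induction n generalizing a with
  | zero =>
    have hba : b ≤ a := by omega
    simp [PySem.List.pyRange_one_eq_nil hba]
  | succ n ih =>
    have hab : a < b := by omega
    have h2 : (b - (a + 1)).toNat = n := by omega
    rw [PySem.List.pyRange_one_cons hab, ih (a + 1) h2, List.range_succ_eq_map]
    rw [List.map_cons, List.map_map]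
    have h0 : a + Int.ofNat 0 = a := by simp
    rw [h0]
    exact congrArg (List.cons a)
      (List.map_congr_left fun j _ => by simp only [Function.comp_apply, Int.ofNat_eq_natCast, Nat.cast_succ]; ring)

-- in a strictly increasing list, every element is ≤ the last one
theorem pv_le_getLast (acc : List String) :
    acc.Pairwise (· < ·) → ∀ x ∈ acc, ∃ m, acc.getLast? = some m ∧ x ≤ m := by
  induction acc with
  | nil => intro _ x hx; cases hx
  | cons a t ih =>
    intro h x hx
    cases t with
    | nil =>
      simp at hx
      exact ⟨a, by simp [hx]⟩
    | cons b t' =>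
      rcases List.mem_cons.mp hx with hxa | hxt
      · obtain ⟨m, hm, hbm⟩ := ih (List.Pairwise.tail h) b (List.mem_cons_self ..)
        refine ⟨m, by simpa using hm, ?_⟩
        have hab : a < b := (List.pairwise_cons.mp h).1 b (List.mem_cons_self ..)
        exact hxa ▸ le_of_lt (lt_of_lt_of_le hab hbm)
      · obtain ⟨m, hm, hxm⟩ := ih (List.Pairwise.tail h) x hxt
        exact ⟨m, by simpa using hm, hxm⟩

-- B's adjacent-dedup fold over a ≤-sorted list: invariant
theorem pv_dedup_fold_invariant (L acc : List String)
    (hL : L.Pairwise (· ≤ ·)) (hacc : acc.Pairwise (· < ·))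
    (hle : ∀ x ∈ acc, ∀ y ∈ L, x ≤ y) :
    (L.foldl (fun out w => if out = [] ∨ PySem.List.pyGet? out (-1) ≠ some w then out ++ [w] else out) acc).Pairwise (· < ·)
    ∧ ∀ z, z ∈ L.foldl (fun out w => if out = [] ∨ PySem.List.pyGet? out (-1) ≠ some w then out ++ [w] else out) acc
        ↔ z ∈ acc ∨ z ∈ L := by
  induction L generalizing acc with
  | nil => exact ⟨hacc, fun z => by simp⟩
  | cons w L' ih =>
    rw [List.foldl_cons]
    by_cases hcond : acc = [] ∨ PySem.List.pyGet? acc (-1) ≠ some w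
    · rw [if_pos hcond]
      rw [PySem.List.pyGet?_neg_one] at hcond
      have hltw : ∀ x ∈ acc, x < w := by
        intro x hx
        have hxw : x ≤ w := hle x hx w (List.mem_cons_self ..)
        rcases lt_or_eq_of_le hxw with h | h
        · exact h
        · exfalso
          obtain ⟨m, hm, hwm⟩ := pv_le_getLast acc hacc x hx
          have hmw : m ≤ w := hle m (List.mem_of_getLast? hm) w (List.mem_cons_self ..)
          have : m = w := le_antisymm hmw (h ▸ hwm)
          rcases hcond with hnil | hne
          · exact absurd hx (by simp [hnil])
          · exact hne (this ▸ hm)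
      have hacc' : (acc ++ [w]).Pairwise (· < ·) := by
        rw [List.pairwise_append]
        exact ⟨hacc, List.pairwise_singleton _ _, by simpa using hltw⟩
      have hle' : ∀ x ∈ acc ++ [w], ∀ y ∈ L', x ≤ y := by
        intro x hx y hy
        rcases List.mem_append.mp hx with hxa | hxw
        · exact hle x hxa y (List.mem_cons_of_mem _ hy)
        · have : x = w := by simpa using hxw
          exact this ▸ (List.pairwise_cons.mp hL).1 y hy
      obtain ⟨h1, h2⟩ := ih (acc ++ [w]) (List.Pairwise.tail hL) hacc' hle'
      refine ⟨h1, fun z => ?_⟩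
      rw [h2 z]
      simp [or_assoc]
    · rw [if_neg hcond]
      rw [PySem.List.pyGet?_neg_one, not_or, not_not] at hcond
      obtain ⟨hnil, hlast⟩ := hcond
      have hwmem : w ∈ acc := List.mem_of_getLast? hlast
      have hle' : ∀ x ∈ acc, ∀ y ∈ L', x ≤ y :=
        fun x hx y hy => hle x hx y (List.mem_cons_of_mem _ hy)
      obtain ⟨h1, h2⟩ := ih acc (List.Pairwise.tail hL) hacc hle'
      refine ⟨h1, fun z => ?_⟩
      rw [h2 z]
      constructor
      · rintro (h | h)
        · exact Or.inl h
        · exact Or.inr (List.mem_cons_of_mem _ h)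
      · rintro (h | h)
        · exact Or.inl h
        · rcases List.mem_cons.mp h with h | h
          · exact Or.inl (h ▸ hwmem)
          · exact Or.inr h

-- ===== VERDICT (by name: the statement is the Claim_ definition above) =====
theorem uniqueSubstring_spec : Claim_equal_uniqueSubstring := by
  intro s k _
  unfold Spec_uniqueSubstring uniqueSubstring uniqueSubstring_alt
  by_cases h1 : s = "" ∨ k = 0
  · simp [h1]
  by_cases h2 : k ≥ PySem.Str.len s
  · rw [if_neg h1, if_pos h2, if_neg h1, if_pos h2]
  rw [if_neg h1, if_neg h2, if_neg h1, if_neg h2]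
  -- A's loop is set(list-of-windows)
  have hA : (PySem.List.pyRange k (PySem.Str.len s + 1)).foldl
        (fun ss i => PySem.Set.add ss (PySem.Str.slice s (some (i - k)) (some i)))
        PySem.Set.empty
      = PySem.Set.ofList ((PySem.List.pyRange k (PySem.Str.len s + 1)).map
          (fun i => PySem.Str.slice s (some (i - k)) (some i))) := by
    rw [PySem.Set.ofList_eq_foldl, List.foldl_map]
    rfl
  -- A's window list and B's window list coincide (index shift i = j + k)
  have hws : (PySem.List.pyRange k (PySem.Str.len s + 1)).map
        (fun i => PySem.Str.slice s (some (i - k)) (some i))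
      = (PySem.List.pyRange 0 (PySem.Str.len s - k + 1)).map
        (fun i => PySem.Str.slice s (some i) (some (i + k))) := by
    rw [pv_pyRange_eq_range, pv_pyRange_eq_range]
    have hn : (PySem.Str.len s + 1 - k).toNat = (PySem.Str.len s - k + 1 - 0).toNat := by omega
    rw [hn]
    simp only [List.map_map]
    apply List.map_congr_left
    intro j _
    simp only [Function.comp]
    congr 1
    · congr 1; ring
    · congr 1; ring
  rw [hA, hws]
  set ws := (PySem.List.pyRange 0 (PySem.Str.len s - k + 1)).map
      (fun i => PySem.Str.slice s (some i) (some (i + k))) with hws_def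
  set L := ws.mergeSort (fun a b => decide (a ≤ b)) with hL_def
  have hLsorted : L.Pairwise (· ≤ ·) := by
    have := List.pairwise_mergeSort (le := fun a b : String => decide (a ≤ b))
      (fun a b c hab hbc => by simp at hab hbc ⊢; exact le_trans hab hbc)
      (fun a b => by simp; exact le_total _ _) ws
    exact this.imp (by simp)
  obtain ⟨hpw, hmem⟩ := pv_dedup_fold_invariant L [] hLsorted (List.Pairwise.nil) (by simp)
  apply PySem.List.sorted_eq_of_perm_of_pairwise_lt _ _ _ ?_ hpw
  -- the dedup result is a permutation of set(ws)
  apply (List.perm_ext_iff_of_nodup (hpw.imp fun h => ne_of_lt h)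
    (PySem.Set.nodup_ofList ws)).mpr
  intro z
  rw [hmem z, PySem.Set.mem_ofList]
  simp only [List.not_mem_nil, false_or]
  exact (List.mergeSort_perm ws _).mem_iff
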